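-- pv_equiv track=rewrite | github.com/gleskejarosz/cwiczenia | Pomiedzy_100-200/cw.2120.py | executeInstructionsn
-- ===== SOURCE A (Python) =====
-- def executeInstructionsn(n: int, startPos: list, s: str) -> list:
--     vertical_vector = startPos[0]
--     horizontal_vector = startPos[1]
--     result = []
--     moves = 0
--     loop = 0
--
--     while len(s) - loop > 0:
--         s_array = s[loop:]
--         for elem in s_array:
--             if elem == "R":
--                 horizontal_vector += 1
--                 if horizontal_vector > n - 1:
--                     result.append(moves)
--                     break
--                 moves += 1
--             if elem == "L":
--                 horizontal_vector -= 1
--                 if horizontal_vector < 0: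
--                     result.append(moves)
--                     break
--                 moves += 1
--             if elem == "D":
--                 vertical_vector += 1
--                 if vertical_vector > n - 1:
--                     result.append(moves)
--                     break
--                 moves += 1
--             if elem == "U":
--                 vertical_vector -= 1
--                 if vertical_vector < 0:
--                     result.append(moves)
--                     break
--                 moves += 1
--         loop += 1
--         if loop > len(result):
--             result.append(moves)
--         moves = 0
--         vertical_vector = startPos[0]
--         horizontal_vector = startPos[1]
--
--     return result
-- ===== SOURCE B (Python) =====
-- def executeInstructionsn(n: int, startPos: list, s: str) -> list:
--     # One pass of prefix sums + value->earliest-boundary-hit hashmaps, scanned from the end: O(m).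
--     # A boundary break in a direction happens either at the first exact boundary hit reached via
--     # that direction's own character, or (start already beyond that boundary) at the first
--     # occurrence of that character, since the coordinate is monotone until then.
--     v0 = startPos[0]
--     h0 = startPos[1]
--     m = len(s)
--     H = [0] * (m + 1)  # horizontal displacement after first j chars
--     V = [0] * (m + 1)  # vertical displacement
--     C = [0] * (m + 1)  # count of move characters
--     for j, c in enumerate(s):
--         H[j + 1] = H[j] + (1 if c == "R" else -1 if c == "L" else 0)
--         V[j + 1] = V[j] + (1 if c == "D" else -1 if c == "U" else 0)
--         C[j + 1] = C[j] + (1 if c in "RLDU" else 0)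
--     INF = m + 1
--     mapR = {}  # H-value -> smallest index k > i with H[k] == value reached by an 'R'
--     mapL = {}
--     mapD = {}  # same for V and 'D'/'U'
--     mapU = {}
--     fR = fL = fD = fU = m  # first index >= i holding the character, m = none
--     res = [0] * m
--     for i in range(m - 1, -1, -1):
--         c = s[i]
--         if c == "R":
--             mapR[H[i + 1]] = i + 1
--             fR = i
--         elif c == "L":
--             mapL[H[i + 1]] = i + 1
--             fL = i
--         elif c == "D":
--             mapD[V[i + 1]] = i + 1
--             fD = i
--         elif c == "U":
--             mapU[V[i + 1]] = i + 1
--             fU = i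
--         aR = fR + 1 if fR < m and H[fR] >= H[i] + (n - 1 - h0) else INF
--         aL = fL + 1 if fL < m and H[fL] <= H[i] - h0 else INF
--         aD = fD + 1 if fD < m and V[fD] >= V[i] + (n - 1 - v0) else INF
--         aU = fU + 1 if fU < m and V[fU] <= V[i] - v0 else INF
--         bR = mapR.get(H[i] + (n - h0), INF)
--         bL = mapL.get(H[i] - (h0 + 1), INF)
--         bD = mapD.get(V[i] + (n - v0), INF)
--         bU = mapU.get(V[i] - (v0 + 1), INF)
--         j = min(min(min(aR, bR), min(aL, bL)), min(min(aD, bD), min(aU, bU)))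
--         res[i] = (C[j - 1] if j <= m else C[m]) - C[i]
--     return res
-- ===== Notes on version B (the rewrite author's own statement) =====
-- stated objective: faster
-- what changed: B replaces A's per-start-index re-simulation of each suffix by a single backward pass using prefix displacement/move-count sums plus, per direction, a hashmap from displacement value to the earliest exact boundary hit via that direction's character and a first-occurrence pointer.
import Mathlib
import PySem

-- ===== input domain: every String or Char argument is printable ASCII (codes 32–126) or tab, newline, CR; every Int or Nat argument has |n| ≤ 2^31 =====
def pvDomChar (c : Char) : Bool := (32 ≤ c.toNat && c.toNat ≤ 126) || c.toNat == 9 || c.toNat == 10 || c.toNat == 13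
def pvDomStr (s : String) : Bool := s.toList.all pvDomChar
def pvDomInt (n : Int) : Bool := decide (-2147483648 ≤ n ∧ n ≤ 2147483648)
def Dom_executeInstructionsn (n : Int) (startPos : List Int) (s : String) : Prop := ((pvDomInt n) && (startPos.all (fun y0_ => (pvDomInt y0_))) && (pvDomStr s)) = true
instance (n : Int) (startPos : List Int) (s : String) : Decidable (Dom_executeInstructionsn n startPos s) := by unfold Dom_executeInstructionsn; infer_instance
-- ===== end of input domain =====

-- B replaces A's per-start-index re-simulation by one pass of prefix displacement sums plus,
-- per direction, a hashmap from displacement value to the earliest exact boundary hit reached via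
-- that direction's character and a first-occurrence pointer, scanned from the end (objective: faster).

-- ===== PORT A =====
-- inner `for elem in s_array` loop; the four Python `if`s are mutually exclusive (elem is one
-- char), so the elif-chain is exact; returns (broke?, moves at the break / final moves)
def pvInnerA (nn : Int) : List Char → Int → Int → Int → Bool × Int
  | [], _, _, moves => (false, moves)
  | c :: rest, v, h, moves =>
    if c = 'R' then
      if h + 1 > nn - 1 then (true, moves) else pvInnerA nn rest v (h + 1) (moves + 1)
    else if c = 'L' then
      if h - 1 < 0 then (true, moves) else pvInnerA nn rest v (h - 1) (moves + 1)
    else if c = 'D' then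
      if v + 1 > nn - 1 then (true, moves) else pvInnerA nn rest (v + 1) h (moves + 1)
    else if c = 'U' then
      if v - 1 < 0 then (true, moves) else pvInnerA nn rest (v - 1) h (moves + 1)
    else pvInnerA nn rest v h moves

-- outer `while len(s) - loop > 0` loop: s_array = s[loop:] is the current suffix, recursion on it
def pvOuterA (nn v0 h0 : Int) : List Char → Nat → List Int → List Int
  | [], _, result => result
  | l@(_ :: rest), loop, result =>
    let r := pvInnerA nn l v0 h0 0          -- the for-loop (break appends r.2 when r.1)
    let result := if r.1 then result ++ [r.2] else result
    let loop := loop + 1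
    let result := if loop > result.length then result ++ [r.2] else result
    pvOuterA nn v0 h0 rest loop result

def executeInstructionsn (n : Int) (startPos : List Int) (s : String) : List Int :=
  match startPos with
  | v0 :: h0 :: _ => pvOuterA n v0 h0 s.toList 0 []
  | _ => []        -- Python raises IndexError here; excluded by Pre_

-- ===== PORT B =====
def pvDh (c : Char) : Int := if c = 'R' then 1 else if c = 'L' then -1 else 0
def pvDv (c : Char) : Int := if c = 'D' then 1 else if c = 'U' then -1 else 0
def pvDc (c : Char) : Int := if c = 'R' ∨ c = 'L' ∨ c = 'D' ∨ c = 'U' then 1 else 0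

-- Source B's first loop: builds the prefix arrays H, V, C (state: the three lists + running sums)
def pvStepB (st : (List Int × List Int × List Int) × (Int × Int × Int)) (c : Char) :
    (List Int × List Int × List Int) × (Int × Int × Int) :=
  let h' := st.2.1 + pvDh c
  let v' := st.2.2.1 + pvDv c
  let c' := st.2.2.2 + pvDc c
  ((st.1.1 ++ [h'], st.1.2.1 ++ [v'], st.1.2.2 ++ [c']), (h', v', c'))

def pvPrefixes (cs : List Char) : List Int × List Int × List Int :=
  (cs.foldl pvStepB (([0], [0], [0]), (0, 0, 0))).1

-- Source B's second loop: i runs m-1, …, 0; res[i] is assigned once, so the countdown recursion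
-- builds res by consing the new entry in front; the elif chain is the nested if below
def pvLoopB (nn v0 h0 : Int) (cs : List Char) (H V C : List Int) (m : Nat) :
    Nat → PySem.Dict Int Int → PySem.Dict Int Int → PySem.Dict Int Int → PySem.Dict Int Int →
      Nat → Nat → Nat → Nat → List Int → List Int
  | 0, _, _, _, _, _, _, _, _, res => res
  | i + 1, mR, mL, mD, mU, fR, fL, fD, fU, res =>
    let c := cs.getD i ' '            -- s[i], always in range in Python
    let st :=
      if c = 'R' then (mR.insert (H[i+1]!) ((i : Int) + 1), mL, mD, mU, i, fL, fD, fU)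
      else if c = 'L' then (mR, mL.insert (H[i+1]!) ((i : Int) + 1), mD, mU, fR, i, fD, fU)
      else if c = 'D' then (mR, mL, mD.insert (V[i+1]!) ((i : Int) + 1), mU, fR, fL, i, fU)
      else if c = 'U' then (mR, mL, mD, mU.insert (V[i+1]!) ((i : Int) + 1), fR, fL, fD, i)
      else (mR, mL, mD, mU, fR, fL, fD, fU)
    let mR := st.1; let mL := st.2.1; let mD := st.2.2.1; let mU := st.2.2.2.1
    let fR := st.2.2.2.2.1; let fL := st.2.2.2.2.2.1
    let fD := st.2.2.2.2.2.2.1; let fU := st.2.2.2.2.2.2.2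
    let INF : Int := (m : Int) + 1
    let aR := if fR < m ∧ H[i]! + (nn - 1 - h0) ≤ H[fR]! then ((fR : Int) + 1) else INF
    let aL := if fL < m ∧ H[fL]! ≤ H[i]! - h0 then ((fL : Int) + 1) else INF
    let aD := if fD < m ∧ V[i]! + (nn - 1 - v0) ≤ V[fD]! then ((fD : Int) + 1) else INF
    let aU := if fU < m ∧ V[fU]! ≤ V[i]! - v0 then ((fU : Int) + 1) else INF
    let bR := mR.getD (H[i]! + (nn - h0)) INF
    let bL := mL.getD (H[i]! - (h0 + 1)) INF
    let bD := mD.getD (V[i]! + (nn - v0)) INF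
    let bU := mU.getD (V[i]! - (v0 + 1)) INF
    let j := min (min (min aR bR) (min aL bL)) (min (min aD bD) (min aU bU))
    -- Python indexes C[j-1] (j ≥ 1 there); (j-1).toNat is exact on that range
    let res := ((if j ≤ (m : Int) then C[(j - 1).toNat]! else C[m]!) - C[i]!) :: res
    pvLoopB nn v0 h0 cs H V C m i mR mL mD mU fR fL fD fU res

def executeInstructionsn_alt (n : Int) (startPos : List Int) (s : String) : List Int :=
  let v0 := startPos[0]!   -- Python startPos[0]; the IndexError inputs are excluded by Pre_
  let h0 := startPos[1]!
  let cs := s.toList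
  let p := pvPrefixes cs
  pvLoopB n v0 h0 cs p.1 p.2.1 p.2.2 cs.length cs.length
    PySem.Dict.empty PySem.Dict.empty PySem.Dict.empty PySem.Dict.empty
    cs.length cs.length cs.length cs.length []

-- ===== PRECONDITION & SPEC =====
-- Pre_ excludes only the inputs on which A raises IndexError (fewer than two start coordinates).
def Pre_executeInstructionsn (n : Int) (startPos : List Int) (s : String) : Prop :=
  2 ≤ startPos.length
instance (n : Int) (startPos : List Int) (s : String) : Decidable (Pre_executeInstructionsn n startPos s) := by unfold Pre_executeInstructionsn; infer_instance

def pvWitness_executeInstructionsn : Int × List Int × String := (3, [1, 2], "RDLUUR")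

def Spec_executeInstructionsn (n : Int) (startPos : List Int) (s : String) (out : List Int) : Prop := out = executeInstructionsn_alt n startPos s
instance (n : Int) (startPos : List Int) (s : String) (out : List Int) : Decidable (Spec_executeInstructionsn n startPos s out) := by unfold Spec_executeInstructionsn; infer_instance

-- ===== CLAIM (what is proved, stated in full; the proofs are below) =====
def Claim_equal_executeInstructionsn : Prop := ∀ (n : Int) (startPos : List Int) (s : String), Dom_executeInstructionsn n startPos s → Pre_executeInstructionsn n startPos s → Spec_executeInstructionsn n startPos s (executeInstructionsn n startPos s)

-- ===== LEMMAS AND PROOFS =====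

-- prefix sums of the displacement / move-count deltas over the first k characters
def pvSH (cs : List Char) (k : Nat) : Int := ((cs.take k).map pvDh).sum
def pvSV (cs : List Char) (k : Nat) : Int := ((cs.take k).map pvDv).sum
def pvSC (cs : List Char) (k : Nat) : Int := ((cs.take k).map pvDc).sum

-- generic direction machinery: a coordinate g grows by exactly 1 on ch and never otherwise;
-- a break via ch at step k-1 needs th ≤ g (k-1); the exact boundary hit is g k = th + 1
def pvHitD (cs : List Char) (ch : Char) (g : Nat → Int) (th : Int) (k : Nat) : Bool :=
  decide (cs.getD (k - 1) ' ' = ch) && decide (th ≤ g (k - 1))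
def pvExact (cs : List Char) (ch : Char) (g : Nat → Int) (th : Int) (k : Nat) : Bool :=
  decide (cs.getD (k - 1) ' ' = ch) && decide (g k = th + 1)

-- boundary break at prefix index k (step k-1) for the walk started at prefix index i
def pvHit (nn v0 h0 : Int) (cs : List Char) (i k : Nat) : Bool :=
  (pvHitD cs 'R' (pvSH cs) (pvSH cs i + (nn - 1 - h0)) k ||
   pvHitD cs 'L' (fun t => -pvSH cs t) (h0 - pvSH cs i) k) ||
  (pvHitD cs 'D' (pvSV cs) (pvSV cs i + (nn - 1 - v0)) k ||
   pvHitD cs 'U' (fun t => -pvSV cs t) (v0 - pvSV cs i) k)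

-- reference spec: from prefix index k, (broke?, move count) of the walk started at i
def pvG (nn v0 h0 : Int) (cs : List Char) (i k : Nat) : Bool × Int :=
  if hk : k < cs.length then
    if pvHit nn v0 h0 cs i (k + 1) then (true, pvSC cs k - pvSC cs i)
    else pvG nn v0 h0 cs i (k + 1)
  else (false, pvSC cs cs.length - pvSC cs i)
termination_by cs.length - k

-- first index in range' a c satisfying p, else inf
def pvFirst (a c : Nat) (p : Nat → Bool) (inf : Int) : Int :=
  match (List.range' a c).find? p with
  | some j => (j : Int)
  | none => inf

-- first index ≥ a holding character ch, else cs.length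
def pvChFirst (cs : List Char) (a : Nat) (ch : Char) : Nat :=
  match (List.range' a (cs.length - a)).find? (fun t => decide (cs.getD t ' ' = ch)) with
  | some k0 => k0
  | none => cs.length

theorem pvTake_succ (cs : List Char) (k : Nat) (hk : k < cs.length) :
    cs.take (k + 1) = cs.take k ++ [cs[k]] := by
  rw [List.take_add_one, List.getElem?_eq_getElem hk]; rfl

theorem pvSH_succ (cs : List Char) (k : Nat) (hk : k < cs.length) :
    pvSH cs (k + 1) = pvSH cs k + pvDh cs[k] := by
  unfold pvSH; rw [pvTake_succ cs k hk, List.map_append, List.sum_append]; simp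

theorem pvSV_succ (cs : List Char) (k : Nat) (hk : k < cs.length) :
    pvSV cs (k + 1) = pvSV cs k + pvDv cs[k] := by
  unfold pvSV; rw [pvTake_succ cs k hk, List.map_append, List.sum_append]; simp

theorem pvSC_succ (cs : List Char) (k : Nat) (hk : k < cs.length) :
    pvSC cs (k + 1) = pvSC cs k + pvDc cs[k] := by
  unfold pvSC; rw [pvTake_succ cs k hk, List.map_append, List.sum_append]; simp

theorem pvGetD_lt (cs : List Char) (k : Nat) (hk : k < cs.length) :
    cs.getD k ' ' = cs[k] := by
  simp [List.getD_eq_getElem?_getD, List.getElem?_eq_getElem hk]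

-- A's inner loop equals the reference spec
theorem pvInner_eq_G (nn v0 h0 : Int) (cs : List Char) (i k : Nat)
    (hik : i ≤ k) (hkm : k ≤ cs.length) :
    pvInnerA nn (cs.drop k) (v0 + (pvSV cs k - pvSV cs i)) (h0 + (pvSH cs k - pvSH cs i))
        (pvSC cs k - pvSC cs i) = pvG nn v0 h0 cs i k := by
  have main : ∀ (n k : Nat), cs.length - k = n → i ≤ k → k ≤ cs.length →
      pvInnerA nn (cs.drop k) (v0 + (pvSV cs k - pvSV cs i)) (h0 + (pvSH cs k - pvSH cs i))
        (pvSC cs k - pvSC cs i) = pvG nn v0 h0 cs i k := by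
    intro n
    induction n with
    | zero =>
      intro k hn _ _
      have hk : k = cs.length := by omega
      subst hk
      rw [List.drop_length, pvG]
      simp [pvInnerA]
    | succ n ih =>
      intro k hn hik' hkm'
      have hklt : k < cs.length := by omega
      rw [List.drop_eq_getElem_cons hklt]
      simp only [pvInnerA]
      by_cases hcR : cs[k] = 'R'
      · rw [if_pos hcR]
        have eH : pvSH cs (k+1) = pvSH cs k + (1) := by
          rw [pvSH_succ _ _ hklt]; simp [pvDh, hcR]
        have eV : pvSV cs (k+1) = pvSV cs k + (0) := by
          rw [pvSV_succ _ _ hklt]; simp [pvDv, hcR]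
        have eC : pvSC cs (k+1) = pvSC cs k + 1 := by
          rw [pvSC_succ _ _ hklt]; simp [pvDc, hcR]
        have hgd : cs.getD k ' ' = 'R' := by rw [pvGetD_lt cs k hklt, hcR]
        by_cases hb : h0 + (pvSH cs k - pvSH cs i) + 1 > nn - 1
        · rw [if_pos hb]
          have hhit : pvHit nn v0 h0 cs i (k+1) = true := by
            simp only [pvHit, pvHitD, Nat.add_sub_cancel, hgd]
            simp
            omega
          rw [pvG, dif_pos hklt, if_pos hhit]
        · rw [if_neg hb]
          have hhit : pvHit nn v0 h0 cs i (k+1) = false := by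
            simp only [pvHit, pvHitD, Nat.add_sub_cancel, hgd]
            simp
            omega
          rw [pvG, dif_pos hklt, if_neg (by simp [hhit])]
          have hrec := ih (k+1) (by omega) (by omega) (by omega)
          rw [show v0 + (pvSV cs k - pvSV cs i) = v0 + (pvSV cs (k+1) - pvSV cs i) by rw [eV]; ring,
            show h0 + (pvSH cs k - pvSH cs i) + 1 = h0 + (pvSH cs (k+1) - pvSH cs i) by rw [eH]; ring,
            show pvSC cs k - pvSC cs i + 1 = pvSC cs (k+1) - pvSC cs i by rw [eC]; ring]
          exact hrec
      · rw [if_neg hcR]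
        by_cases hcL : cs[k] = 'L'
        · rw [if_pos hcL]
          have eH : pvSH cs (k+1) = pvSH cs k + (-1) := by
            rw [pvSH_succ _ _ hklt]; simp [pvDh, hcR, hcL]
          have eV : pvSV cs (k+1) = pvSV cs k + (0) := by
            rw [pvSV_succ _ _ hklt]; simp [pvDv, hcR, hcL]
          have eC : pvSC cs (k+1) = pvSC cs k + 1 := by
            rw [pvSC_succ _ _ hklt]; simp [pvDc, hcR, hcL]
          have hgd : cs.getD k ' ' = 'L' := by rw [pvGetD_lt cs k hklt, hcL]
          by_cases hb : h0 + (pvSH cs k - pvSH cs i) - 1 < 0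
          · rw [if_pos hb]
            have hhit : pvHit nn v0 h0 cs i (k+1) = true := by
              simp only [pvHit, pvHitD, Nat.add_sub_cancel, hgd]
              simp
              omega
            rw [pvG, dif_pos hklt, if_pos hhit]
          · rw [if_neg hb]
            have hhit : pvHit nn v0 h0 cs i (k+1) = false := by
              simp only [pvHit, pvHitD, Nat.add_sub_cancel, hgd]
              simp
              omega
            rw [pvG, dif_pos hklt, if_neg (by simp [hhit])]
            have hrec := ih (k+1) (by omega) (by omega) (by omega)
            rw [show v0 + (pvSV cs k - pvSV cs i) = v0 + (pvSV cs (k+1) - pvSV cs i) by rw [eV]; ring,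
              show h0 + (pvSH cs k - pvSH cs i) - 1 = h0 + (pvSH cs (k+1) - pvSH cs i) by rw [eH]; ring,
              show pvSC cs k - pvSC cs i + 1 = pvSC cs (k+1) - pvSC cs i by rw [eC]; ring]
            exact hrec
        · rw [if_neg hcL]
          by_cases hcD : cs[k] = 'D'
          · rw [if_pos hcD]
            have eH : pvSH cs (k+1) = pvSH cs k + (0) := by
              rw [pvSH_succ _ _ hklt]; simp [pvDh, hcR, hcL, hcD]
            have eV : pvSV cs (k+1) = pvSV cs k + (1) := by
              rw [pvSV_succ _ _ hklt]; simp [pvDv, hcR, hcL, hcD]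
            have eC : pvSC cs (k+1) = pvSC cs k + 1 := by
              rw [pvSC_succ _ _ hklt]; simp [pvDc, hcR, hcL, hcD]
            have hgd : cs.getD k ' ' = 'D' := by rw [pvGetD_lt cs k hklt, hcD]
            by_cases hb : v0 + (pvSV cs k - pvSV cs i) + 1 > nn - 1
            · rw [if_pos hb]
              have hhit : pvHit nn v0 h0 cs i (k+1) = true := by
                simp only [pvHit, pvHitD, Nat.add_sub_cancel, hgd]
                simp
                omega
              rw [pvG, dif_pos hklt, if_pos hhit]
            · rw [if_neg hb]
              have hhit : pvHit nn v0 h0 cs i (k+1) = false := by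
                simp only [pvHit, pvHitD, Nat.add_sub_cancel, hgd]
                simp
                omega
              rw [pvG, dif_pos hklt, if_neg (by simp [hhit])]
              have hrec := ih (k+1) (by omega) (by omega) (by omega)
              rw [show v0 + (pvSV cs k - pvSV cs i) + 1 = v0 + (pvSV cs (k+1) - pvSV cs i) by rw [eV]; ring,
                show h0 + (pvSH cs k - pvSH cs i) = h0 + (pvSH cs (k+1) - pvSH cs i) by rw [eH]; ring,
                show pvSC cs k - pvSC cs i + 1 = pvSC cs (k+1) - pvSC cs i by rw [eC]; ring]
              exact hrec
          · rw [if_neg hcD]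
            by_cases hcU : cs[k] = 'U'
            · rw [if_pos hcU]
              have eH : pvSH cs (k+1) = pvSH cs k + (0) := by
                rw [pvSH_succ _ _ hklt]; simp [pvDh, hcR, hcL, hcD, hcU]
              have eV : pvSV cs (k+1) = pvSV cs k + (-1) := by
                rw [pvSV_succ _ _ hklt]; simp [pvDv, hcR, hcL, hcD, hcU]
              have eC : pvSC cs (k+1) = pvSC cs k + 1 := by
                rw [pvSC_succ _ _ hklt]; simp [pvDc, hcR, hcL, hcD, hcU]
              have hgd : cs.getD k ' ' = 'U' := by rw [pvGetD_lt cs k hklt, hcU]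
              by_cases hb : v0 + (pvSV cs k - pvSV cs i) - 1 < 0
              · rw [if_pos hb]
                have hhit : pvHit nn v0 h0 cs i (k+1) = true := by
                  simp only [pvHit, pvHitD, Nat.add_sub_cancel, hgd]
                  simp
                  omega
                rw [pvG, dif_pos hklt, if_pos hhit]
              · rw [if_neg hb]
                have hhit : pvHit nn v0 h0 cs i (k+1) = false := by
                  simp only [pvHit, pvHitD, Nat.add_sub_cancel, hgd]
                  simp
                  omega
                rw [pvG, dif_pos hklt, if_neg (by simp [hhit])]
                have hrec := ih (k+1) (by omega) (by omega) (by omega)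
                rw [show v0 + (pvSV cs k - pvSV cs i) - 1 = v0 + (pvSV cs (k+1) - pvSV cs i) by rw [eV]; ring,
                  show h0 + (pvSH cs k - pvSH cs i) = h0 + (pvSH cs (k+1) - pvSH cs i) by rw [eH]; ring,
                  show pvSC cs k - pvSC cs i + 1 = pvSC cs (k+1) - pvSC cs i by rw [eC]; ring]
                exact hrec
            · rw [if_neg hcU]
              have eH : pvSH cs (k+1) = pvSH cs k := by
                rw [pvSH_succ _ _ hklt]; simp [pvDh, hcR, hcL]
              have eV : pvSV cs (k+1) = pvSV cs k := by
                rw [pvSV_succ _ _ hklt]; simp [pvDv, hcD, hcU]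
              have eC : pvSC cs (k+1) = pvSC cs k := by
                rw [pvSC_succ _ _ hklt]; simp [pvDc, hcR, hcL, hcD, hcU]
              have hgd : cs.getD k ' ' = cs[k] := pvGetD_lt cs k hklt
              have hhit : pvHit nn v0 h0 cs i (k+1) = false := by
                simp only [pvHit, pvHitD, Nat.add_sub_cancel, hgd]
                simp [hcR, hcL, hcD, hcU]
              rw [pvG, dif_pos hklt, if_neg (by simp [hhit])]
              have hrec := ih (k+1) (by omega) (by omega) (by omega)
              rw [show v0 + (pvSV cs k - pvSV cs i) = v0 + (pvSV cs (k+1) - pvSV cs i) by rw [eV],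
                show h0 + (pvSH cs k - pvSH cs i) = h0 + (pvSH cs (k+1) - pvSH cs i) by rw [eH],
                show pvSC cs k - pvSC cs i = pvSC cs (k+1) - pvSC cs i by rw [eC]]
              exact hrec
  exact main (cs.length - k) k rfl hik hkm

theorem pvInner_start (nn v0 h0 : Int) (cs : List Char) (i : Nat) (him : i ≤ cs.length) :
    pvInnerA nn (cs.drop i) v0 h0 0 = pvG nn v0 h0 cs i i := by
  have h := pvInner_eq_G nn v0 h0 cs i i le_rfl him
  simpa using h

-- A's outer loop produces the per-start values of the reference spec
theorem pvOuter_eq (nn v0 h0 : Int) (cs : List Char) (i : Nat) (acc : List Int)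
    (hlen : acc.length = i) (him : i ≤ cs.length) :
    pvOuterA nn v0 h0 (cs.drop i) i acc =
      acc ++ (List.range' i (cs.length - i)).map (fun t => (pvG nn v0 h0 cs t t).2) := by
  have main : ∀ (n i : Nat) (acc : List Int), cs.length - i = n → acc.length = i →
      i ≤ cs.length →
      pvOuterA nn v0 h0 (cs.drop i) i acc =
        acc ++ (List.range' i (cs.length - i)).map (fun t => (pvG nn v0 h0 cs t t).2) := by
    intro n
    induction n with
    | zero =>
      intro i acc hn hlen' him'
      have hi : i = cs.length := by omega
      subst hi
      rw [List.drop_length]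
      simp [pvOuterA]
    | succ n ih =>
      intro i acc hn hlen' him'
      have hilt : i < cs.length := by omega
      rw [List.drop_eq_getElem_cons hilt]
      simp only [pvOuterA]
      rw [← List.drop_eq_getElem_cons hilt, pvInner_start nn v0 h0 cs i (by omega)]
      have hstep : (if (i + 1 : Nat) >
            (if (pvG nn v0 h0 cs i i).1 then acc ++ [(pvG nn v0 h0 cs i i).2] else acc).length
          then (if (pvG nn v0 h0 cs i i).1 then acc ++ [(pvG nn v0 h0 cs i i).2] else acc) ++
            [(pvG nn v0 h0 cs i i).2]
          else (if (pvG nn v0 h0 cs i i).1 then acc ++ [(pvG nn v0 h0 cs i i).2] else acc)) =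
          acc ++ [(pvG nn v0 h0 cs i i).2] := by
        cases hr : (pvG nn v0 h0 cs i i).1 <;> simp [hlen']
      rw [hstep, ih (i+1) (acc ++ [(pvG nn v0 h0 cs i i).2]) (by omega) (by simp [hlen']) (by omega)]
      rw [show cs.length - i = (cs.length - (i+1)) + 1 by omega, List.range'_succ]
      simp
  exact main (cs.length - i) i acc rfl hlen him

-- B-side: the first loop builds the map-range prefix lists
theorem pvPrefixes_fold (cs : List Char) :
    cs.foldl pvStepB (([0], [0], [0]), (0, 0, 0)) =
      (((List.range (cs.length + 1)).map (pvSH cs),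
        (List.range (cs.length + 1)).map (pvSV cs),
        (List.range (cs.length + 1)).map (pvSC cs)),
       (pvSH cs cs.length, pvSV cs cs.length, pvSC cs cs.length)) := by
  induction cs using List.reverseRecOn with
  | nil => simp [pvSH, pvSV, pvSC, List.range_succ]
  | append_singleton cs c ih =>
    have hgetc : (cs ++ [c])[cs.length]'(by simp) = c := by
      simp
    have hS : ∀ k, k ≤ cs.length → pvSH (cs ++ [c]) k = pvSH cs k := by
      intro k hk; unfold pvSH; rw [List.take_append_of_le_length hk]
    have hV : ∀ k, k ≤ cs.length → pvSV (cs ++ [c]) k = pvSV cs k := by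
      intro k hk; unfold pvSV; rw [List.take_append_of_le_length hk]
    have hC : ∀ k, k ≤ cs.length → pvSC (cs ++ [c]) k = pvSC cs k := by
      intro k hk; unfold pvSC; rw [List.take_append_of_le_length hk]
    have hS1 : pvSH (cs ++ [c]) (cs.length + 1) = pvSH cs cs.length + pvDh c := by
      rw [pvSH_succ (cs ++ [c]) cs.length (by simp), hS _ le_rfl, hgetc]
    have hV1 : pvSV (cs ++ [c]) (cs.length + 1) = pvSV cs cs.length + pvDv c := by
      rw [pvSV_succ (cs ++ [c]) cs.length (by simp), hV _ le_rfl, hgetc]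
    have hC1 : pvSC (cs ++ [c]) (cs.length + 1) = pvSC cs cs.length + pvDc c := by
      rw [pvSC_succ (cs ++ [c]) cs.length (by simp), hC _ le_rfl, hgetc]
    have hm : ∀ (g g' : Nat → Int), (∀ k, k ≤ cs.length → g k = g' k) →
        (List.range (cs.length + 1)).map g = (List.range (cs.length + 1)).map g' := by
      intro g g' hgg
      refine List.map_congr_left ?_
      intro k hk
      exact hgg k (by simpa [Nat.lt_succ_iff] using hk)
    rw [List.foldl_append, ih]
    simp only [List.foldl_cons, List.foldl_nil, pvStepB, List.length_append,
      List.length_singleton]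
    rw [show cs.length + 1 + 1 = (cs.length + 1) + 1 by rfl, List.range_succ, List.range_succ]
    simp only [List.map_append, List.map_cons, List.map_nil, Prod.mk.injEq]
    refine ⟨⟨?_, ?_, ?_⟩, ?_, ?_, ?_⟩
    · rw [hm _ _ hS, List.range_succ]
      simp [hS1]
    · rw [hm _ _ hV, List.range_succ]
      simp [hV1]
    · rw [hm _ _ hC, List.range_succ]
      simp [hC1]
    · rw [hS1]
    · rw [hV1]
    · rw [hC1]

theorem pvMapRangeGet (f : Nat → Int) (n k : Nat) (hk : k < n) :
    ((List.range n).map f)[k]! = f k := by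
  rw [getElem!_pos _ _ (by simpa using hk)]
  simp

theorem pvFirst_ge (a c : Nat) (p : Nat → Bool) (inf : Int) (h : (a : Int) ≤ inf) :
    (a : Int) ≤ pvFirst a c p inf := by
  unfold pvFirst
  cases hfind : (List.range' a c).find? p with
  | none => simpa using h
  | some j =>
    have hj := List.mem_of_find?_eq_some hfind
    rw [List.mem_range'_1] at hj
    simp only []
    exact_mod_cast hj.1

theorem pvFirst_le (a c : Nat) (p : Nat → Bool) (inf : Int) (h : (a : Int) + c ≤ inf + 1) :
    pvFirst a c p inf ≤ inf := by
  unfold pvFirst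
  cases hfind : (List.range' a c).find? p with
  | none => simp
  | some j =>
    have hj := List.mem_of_find?_eq_some hfind
    rw [List.mem_range'_1] at hj
    simp only []
    omega

theorem pvFirst_eq_some (a c : Nat) (p : Nat → Bool) (inf : Int) (j : Nat)
    (h : (List.range' a c).find? p = some j) : pvFirst a c p inf = (j : Int) := by
  unfold pvFirst; rw [h]

theorem pvFirst_eq_none (a c : Nat) (p : Nat → Bool) (inf : Int)
    (h : (List.range' a c).find? p = none) : pvFirst a c p inf = inf := by
  unfold pvFirst; rw [h]

theorem pvFirst_step (a c : Nat) (p : Nat → Bool) (inf : Int) :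
    pvFirst a (c + 1) p inf = if p a then (a : Int) else pvFirst (a + 1) c p inf := by
  unfold pvFirst
  rw [List.range'_succ, List.find?_cons]
  by_cases hp : p a <;> simp [hp]

theorem pvFirst_congr (a c : Nat) (p q : Nat → Bool) (inf : Int) (h : ∀ j, p j = q j) :
    pvFirst a c p inf = pvFirst a c q inf := by
  rw [show p = q from funext h]

theorem pvFirst_or (a c : Nat) (p q : Nat → Bool) (inf : Int) (h : (a : Int) + c ≤ inf) :
    pvFirst a c (fun j => p j || q j) inf = min (pvFirst a c p inf) (pvFirst a c q inf) := by
  induction c generalizing a with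
  | zero => simp [pvFirst]
  | succ c ih =>
    have hgep := pvFirst_ge (a+1) c p inf (by push_cast at h ⊢; omega)
    have hgeq := pvFirst_ge (a+1) c q inf (by push_cast at h ⊢; omega)
    have hih := ih (a+1) (by push_cast at h ⊢; omega)
    simp only [pvFirst, List.range'_succ, List.find?_cons] at *
    by_cases hp : p a <;> by_cases hq : q a <;>
      simp only [hp, hq, Bool.true_or, Bool.or_true, Bool.false_or, Bool.or_false,
        cond_true, cond_false] at *
    · simp
    · cases hfq : (List.range' (a+1) c).find? q with
      | none => simp [hfq] at hgeq ⊢; omega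
      | some j => simp [hfq] at hgeq ⊢; omega
    · cases hfp : (List.range' (a+1) c).find? p with
      | none => simp [hfp] at hgep ⊢; omega
      | some j => simp [hfp] at hgep ⊢; omega
    · exact hih

theorem pvChFirst_step (cs : List Char) (a : Nat) (ch : Char) (ha : a < cs.length) :
    pvChFirst cs a ch = if cs.getD a ' ' = ch then a else pvChFirst cs (a + 1) ch := by
  unfold pvChFirst
  rw [show cs.length - a = (cs.length - (a + 1)) + 1 by omega, List.range'_succ, List.find?_cons]
  by_cases hc : cs.getD a ' ' = ch
  · have hb : decide (cs.getD a ' ' = ch) = true := by rw [hc]; simp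
    rw [hb, if_pos hc]
  · have hb : decide (cs.getD a ' ' = ch) = false := by
      simpa using hc
    rw [hb, if_neg hc]

theorem pvChFirst_ge (cs : List Char) (a : Nat) (ch : Char) (ha : a ≤ cs.length) :
    a ≤ pvChFirst cs a ch ∧ pvChFirst cs a ch ≤ cs.length := by
  unfold pvChFirst
  cases hfind : (List.range' a (cs.length - a)).find? (fun t => decide (cs.getD t ' ' = ch)) with
  | none => simp [ha]
  | some j =>
    have hj := List.mem_of_find?_eq_some hfind
    rw [List.mem_range'_1] at hj
    simp only []
    omega

-- in the low phase (g k ≤ th) only exact boundary hits can break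
theorem pvPhase2 (cs : List Char) (ch : Char) (g : Nat → Int) (th inf : Int)
    (hstep : ∀ t (ht : t < cs.length), (if cs[t]'ht = ch then g (t+1) = g t + 1 else g (t+1) ≤ g t)) :
    ∀ k, k ≤ cs.length → g k ≤ th →
    pvFirst (k+1) (cs.length - k) (pvHitD cs ch g th) inf =
      pvFirst (k+1) (cs.length - k) (pvExact cs ch g th) inf := by
  have main : ∀ (n k : Nat), cs.length - k = n → k ≤ cs.length → g k ≤ th →
      pvFirst (k+1) (cs.length - k) (pvHitD cs ch g th) inf =
        pvFirst (k+1) (cs.length - k) (pvExact cs ch g th) inf := by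
    intro n
    induction n with
    | zero =>
      intro k hn _ _
      have hk : cs.length - k = 0 := hn
      rw [hk]
      simp [pvFirst]
    | succ n ih =>
      intro k hn hkm hg
      have hklt : k < cs.length := by omega
      have hs := hstep k hklt
      rw [show cs.length - k = (cs.length - (k+1)) + 1 by omega, pvFirst_step, pvFirst_step]
      by_cases hch : cs.getD k ' ' = ch
      · have hck : cs[k] = ch := by rw [← pvGetD_lt cs k hklt]; exact hch
        rw [if_pos hck] at hs
        by_cases hbk : th ≤ g k
        · have h1 : pvHitD cs ch g th (k+1) = true := by
            simp only [pvHitD, Nat.add_sub_cancel, hch]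
            simp [hbk]
          have h2 : pvExact cs ch g th (k+1) = true := by
            simp only [pvExact, Nat.add_sub_cancel, hch]
            simp
            omega
          rw [h1, h2]
          simp
        · have h1 : pvHitD cs ch g th (k+1) = false := by
            simp only [pvHitD, Nat.add_sub_cancel, hch]
            simp [hbk]
          have h2 : pvExact cs ch g th (k+1) = false := by
            simp only [pvExact, Nat.add_sub_cancel, hch]
            simp
            omega
          rw [h1, h2, if_neg (by simp), if_neg (by simp)]
          exact ih (k+1) (by omega) (by omega) (by omega)
      · have h1 : pvHitD cs ch g th (k+1) = false := by
          simp only [pvHitD, Nat.add_sub_cancel, hch]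
          simp
        have h2 : pvExact cs ch g th (k+1) = false := by
          simp only [pvExact, Nat.add_sub_cancel, hch]
          simp
        have hck : ¬ (cs[k] = ch) := by rw [← pvGetD_lt cs k hklt]; exact hch
        rw [if_neg hck] at hs
        rw [h1, h2, if_neg (by simp), if_neg (by simp)]
        exact ih (k+1) (by omega) (by omega) (by omega)
  intro k hkm hg
  exact main (cs.length - k) k rfl hkm hg

-- first break via ch = min(first-ch candidate, exact-hit candidate)
theorem pvDirFirst (cs : List Char) (ch : Char) (g : Nat → Int) (th inf : Int)
    (hinf : (cs.length : Int) < inf)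
    (hstep : ∀ t (ht : t < cs.length), (if cs[t]'ht = ch then g (t+1) = g t + 1 else g (t+1) ≤ g t)) :
    ∀ k, k ≤ cs.length →
    pvFirst (k+1) (cs.length - k) (pvHitD cs ch g th) inf =
      min (if pvChFirst cs k ch < cs.length ∧ th ≤ g (pvChFirst cs k ch)
           then ((pvChFirst cs k ch : Int) + 1) else inf)
          (pvFirst (k+1) (cs.length - k) (pvExact cs ch g th) inf) := by
  have main : ∀ (n k : Nat), cs.length - k = n → k ≤ cs.length →
      pvFirst (k+1) (cs.length - k) (pvHitD cs ch g th) inf =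
        min (if pvChFirst cs k ch < cs.length ∧ th ≤ g (pvChFirst cs k ch)
             then ((pvChFirst cs k ch : Int) + 1) else inf)
            (pvFirst (k+1) (cs.length - k) (pvExact cs ch g th) inf) := by
    intro n
    induction n with
    | zero =>
      intro k hn hkm
      have hk : k = cs.length := by omega
      subst hk
      have hcf : pvChFirst cs cs.length ch = cs.length := by
        unfold pvChFirst
        simp
      rw [hcf, Nat.sub_self]
      simp [pvFirst]
    | succ n ih =>
      intro k hn hkm
      have hklt : k < cs.length := by omega
      have hs := hstep k hklt
      rw [show cs.length - k = (cs.length - (k+1)) + 1 by omega, pvFirst_step, pvFirst_step]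
      by_cases hch : cs.getD k ' ' = ch
      · have hck : cs[k] = ch := by rw [← pvGetD_lt cs k hklt]; exact hch
        rw [if_pos hck] at hs
        have hcf : pvChFirst cs k ch = k := by
          rw [pvChFirst_step cs k ch hklt, if_pos hch]
        rw [hcf]
        by_cases hbk : th ≤ g k
        · have h1 : pvHitD cs ch g th (k+1) = true := by
            simp only [pvHitD, Nat.add_sub_cancel, hch]
            simp [hbk]
          rw [h1, if_pos (by simp), if_pos ⟨hklt, hbk⟩]
          have hB := pvFirst_ge (k+1+1) (cs.length - (k+1)) (pvExact cs ch g th) inf (by omega)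
          have hE : pvExact cs ch g th (k+1) = true ∨ pvExact cs ch g th (k+1) = false := by
            cases pvExact cs ch g th (k+1) <;> simp
          rcases hE with hE | hE
          · rw [hE, if_pos (by simp)]
            omega
          · rw [hE, if_neg (by simp)]
            omega
        · have h1 : pvHitD cs ch g th (k+1) = false := by
            simp only [pvHitD, Nat.add_sub_cancel, hch]
            simp [hbk]
          have h2 : pvExact cs ch g th (k+1) = false := by
            simp only [pvExact, Nat.add_sub_cancel, hch]
            simp
            omega
          rw [h1, h2, if_neg (by simp),
            if_neg (show ¬(k < cs.length ∧ th ≤ g k) from fun hc => hbk hc.2),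
            if_neg (by simp)]
          have hP2 := pvPhase2 cs ch g th inf hstep (k+1) (by omega) (by omega)
          rw [hP2]
          have hle := pvFirst_le (k+1+1) (cs.length - (k+1)) (pvExact cs ch g th) inf (by omega)
          omega
      · have h1 : pvHitD cs ch g th (k+1) = false := by
          simp only [pvHitD, Nat.add_sub_cancel, hch]
          simp
        have h2 : pvExact cs ch g th (k+1) = false := by
          simp only [pvExact, Nat.add_sub_cancel, hch]
          simp
        have hcf : pvChFirst cs k ch = pvChFirst cs (k+1) ch := by
          rw [pvChFirst_step cs k ch hklt, if_neg hch]
        rw [hcf]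
        simp only [h1, h2, Bool.false_eq_true, if_false]
        exact ih (k+1) (by omega) (by omega)
  intro k hkm
  exact main (cs.length - k) k rfl hkm

-- the reference spec via the first break index
theorem pvG_first (nn v0 h0 : Int) (cs : List Char) (i k : Nat) (hik : i ≤ k) (hkm : k ≤ cs.length) :
    pvG nn v0 h0 cs i k =
      match (List.range' (k + 1) (cs.length - k)).find? (fun j => pvHit nn v0 h0 cs i j) with
      | some j => (true, pvSC cs (j - 1) - pvSC cs i)
      | none => (false, pvSC cs cs.length - pvSC cs i) := by
  have main : ∀ (n k : Nat), cs.length - k = n → i ≤ k → k ≤ cs.length →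
      pvG nn v0 h0 cs i k =
        match (List.range' (k + 1) (cs.length - k)).find? (fun j => pvHit nn v0 h0 cs i j) with
        | some j => (true, pvSC cs (j - 1) - pvSC cs i)
        | none => (false, pvSC cs cs.length - pvSC cs i) := by
    intro n
    induction n with
    | zero =>
      intro k hn hik' hkm'
      have hk : k = cs.length := by omega
      subst hk
      rw [pvG]
      simp
    | succ n ih =>
      intro k hn hik' hkm'
      have hklt : k < cs.length := by omega
      rw [pvG]
      rw [dif_pos hklt]
      rw [show cs.length - k = (cs.length - (k+1)) + 1 by omega, List.range'_succ,
        List.find?_cons]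
      by_cases hhit : pvHit nn v0 h0 cs i (k+1)
      · simp [hhit]
      · simp only [hhit, cond_false, if_neg]
        simpa using ih (k+1) (by omega) (by omega) (by omega)
  exact main (cs.length - k) k rfl hik hkm


-- direction step properties of the prefix sums
theorem pvStepPropR (cs : List Char) : ∀ t (ht : t < cs.length),
    if cs[t]'ht = 'R' then pvSH cs (t+1) = pvSH cs t + 1 else pvSH cs (t+1) ≤ pvSH cs t := by
  intro t ht
  by_cases h : cs[t] = 'R'
  · rw [if_pos h, pvSH_succ _ _ ht, h]; simp [pvDh]
  · rw [if_neg h, pvSH_succ _ _ ht]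
    have : pvDh cs[t] ≤ 0 := by unfold pvDh; rw [if_neg h]; split_ifs <;> omega
    omega

theorem pvStepPropL (cs : List Char) : ∀ t (ht : t < cs.length),
    if cs[t]'ht = 'L' then -pvSH cs (t+1) = -pvSH cs t + 1 else -pvSH cs (t+1) ≤ -pvSH cs t := by
  intro t ht
  by_cases h : cs[t] = 'L'
  · rw [if_pos h, pvSH_succ _ _ ht, h]; simp [pvDh]; ring
  · rw [if_neg h, pvSH_succ _ _ ht]
    have : 0 ≤ pvDh cs[t] := by unfold pvDh; split_ifs with h1 <;> simp_all
    omega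

theorem pvStepPropD (cs : List Char) : ∀ t (ht : t < cs.length),
    if cs[t]'ht = 'D' then pvSV cs (t+1) = pvSV cs t + 1 else pvSV cs (t+1) ≤ pvSV cs t := by
  intro t ht
  by_cases h : cs[t] = 'D'
  · rw [if_pos h, pvSV_succ _ _ ht, h]; simp [pvDv]
  · rw [if_neg h, pvSV_succ _ _ ht]
    have : pvDv cs[t] ≤ 0 := by unfold pvDv; rw [if_neg h]; split_ifs <;> omega
    omega

theorem pvStepPropU (cs : List Char) : ∀ t (ht : t < cs.length),
    if cs[t]'ht = 'U' then -pvSV cs (t+1) = -pvSV cs t + 1 else -pvSV cs (t+1) ≤ -pvSV cs t := by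
  intro t ht
  by_cases h : cs[t] = 'U'
  · rw [if_pos h, pvSV_succ _ _ ht, h]; simp [pvDv]; ring
  · rw [if_neg h, pvSV_succ _ _ ht]
    have : 0 ≤ pvDv cs[t] := by unfold pvDv; split_ifs with h1 <;> simp_all
    omega

-- extending a value→earliest-index map invariant one step to the left
theorem pvMapInvInsert (cs : List Char) (ch : Char) (S : Nat → Int) (i : Nat)
    (hilt : i < cs.length) (d : PySem.Dict Int Int)
    (hch : cs.getD i ' ' = ch)
    (hd : ∀ t : Int, d.getD t ((cs.length : Int) + 1) = pvFirst (i+2) (cs.length - (i+1))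
        (fun j => decide (cs.getD (j - 1) ' ' = ch) && decide (S j = t)) ((cs.length : Int) + 1)) :
    ∀ t : Int, (d.insert (S (i+1)) ((i : Int) + 1)).getD t ((cs.length : Int) + 1) =
      pvFirst (i+1) (cs.length - i)
        (fun j => decide (cs.getD (j - 1) ' ' = ch) && decide (S j = t)) ((cs.length : Int) + 1) := by
  intro t
  rw [PySem.Dict.getD_insert, hd t,
    show cs.length - i = (cs.length - (i+1)) + 1 by omega, pvFirst_step]
  by_cases ht : t = S (i+1)
  · have hb : (decide (cs.getD ((i+1) - 1) ' ' = ch) && decide (S (i+1) = t)) = true := by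
      simp only [Nat.add_sub_cancel, hch, ht]
      simp
    rw [if_pos ht, if_pos hb]
    omega
  · have hb : (decide (cs.getD ((i+1) - 1) ' ' = ch) && decide (S (i+1) = t)) = false := by
      simp only [Nat.add_sub_cancel, hch]
      simp
      exact fun he => ht he.symm
    rw [if_neg ht, if_neg (by rw [hb]; simp)]

theorem pvMapInvSkip (cs : List Char) (ch : Char) (S : Nat → Int) (i : Nat)
    (hilt : i < cs.length) (d : PySem.Dict Int Int)
    (hch : ¬ (cs.getD i ' ' = ch))
    (hd : ∀ t : Int, d.getD t ((cs.length : Int) + 1) = pvFirst (i+2) (cs.length - (i+1))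
        (fun j => decide (cs.getD (j - 1) ' ' = ch) && decide (S j = t)) ((cs.length : Int) + 1)) :
    ∀ t : Int, d.getD t ((cs.length : Int) + 1) =
      pvFirst (i+1) (cs.length - i)
        (fun j => decide (cs.getD (j - 1) ' ' = ch) && decide (S j = t)) ((cs.length : Int) + 1) := by
  intro t
  rw [hd t, show cs.length - i = (cs.length - (i+1)) + 1 by omega, pvFirst_step]
  have hb : (decide (cs.getD ((i+1) - 1) ' ' = ch) && decide (S (i+1) = t)) = false := by
    simp only [Nat.add_sub_cancel, hch]
    simp
  rw [if_neg (by rw [hb]; simp)]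

theorem pvPtrSet (cs : List Char) (ch : Char) (i : Nat) (hilt : i < cs.length)
    (hch : cs.getD i ' ' = ch) : i = pvChFirst cs i ch := by
  rw [pvChFirst_step cs i ch hilt, if_pos hch]

theorem pvPtrSkip (cs : List Char) (ch : Char) (i : Nat) (hilt : i < cs.length)
    (hch : ¬ (cs.getD i ' ' = ch)) (f : Nat) (hf : f = pvChFirst cs (i+1) ch) :
    f = pvChFirst cs i ch := by
  rw [pvChFirst_step cs i ch hilt, if_neg hch, ← hf]


-- combined invariant step for the four maps and four pointers
theorem pvStInv (cs : List Char) (i : Nat) (hilt : i < cs.length)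
    (mR mL mD mU : PySem.Dict Int Int) (fR fL fD fU : Nat)
    (hmR : ∀ t : Int, mR.getD t ((cs.length : Int) + 1) = pvFirst (i+2) (cs.length - (i+1))
        (fun j => decide (cs.getD (j - 1) ' ' = 'R') && decide (pvSH cs j = t)) ((cs.length : Int) + 1))
    (hmL : ∀ t : Int, mL.getD t ((cs.length : Int) + 1) = pvFirst (i+2) (cs.length - (i+1))
        (fun j => decide (cs.getD (j - 1) ' ' = 'L') && decide (pvSH cs j = t)) ((cs.length : Int) + 1))
    (hmD : ∀ t : Int, mD.getD t ((cs.length : Int) + 1) = pvFirst (i+2) (cs.length - (i+1))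
        (fun j => decide (cs.getD (j - 1) ' ' = 'D') && decide (pvSV cs j = t)) ((cs.length : Int) + 1))
    (hmU : ∀ t : Int, mU.getD t ((cs.length : Int) + 1) = pvFirst (i+2) (cs.length - (i+1))
        (fun j => decide (cs.getD (j - 1) ' ' = 'U') && decide (pvSV cs j = t)) ((cs.length : Int) + 1))
    (hfR : fR = pvChFirst cs (i+1) 'R') (hfL : fL = pvChFirst cs (i+1) 'L')
    (hfD : fD = pvChFirst cs (i+1) 'D') (hfU : fU = pvChFirst cs (i+1) 'U')
    (st : PySem.Dict Int Int × PySem.Dict Int Int × PySem.Dict Int Int × PySem.Dict Int Int ×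
      Nat × Nat × Nat × Nat)
    (hst : st = (if cs.getD i ' ' = 'R' then
        (mR.insert (pvSH cs (i+1)) ((i : Int) + 1), mL, mD, mU, i, fL, fD, fU)
      else if cs.getD i ' ' = 'L' then
        (mR, mL.insert (pvSH cs (i+1)) ((i : Int) + 1), mD, mU, fR, i, fD, fU)
      else if cs.getD i ' ' = 'D' then
        (mR, mL, mD.insert (pvSV cs (i+1)) ((i : Int) + 1), mU, fR, fL, i, fU)
      else if cs.getD i ' ' = 'U' then
        (mR, mL, mD, mU.insert (pvSV cs (i+1)) ((i : Int) + 1), fR, fL, fD, i)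
      else (mR, mL, mD, mU, fR, fL, fD, fU))) :
    (∀ t : Int, st.1.getD t ((cs.length : Int) + 1) = pvFirst (i+1) (cs.length - i)
        (fun j => decide (cs.getD (j - 1) ' ' = 'R') && decide (pvSH cs j = t)) ((cs.length : Int) + 1)) ∧
    (∀ t : Int, st.2.1.getD t ((cs.length : Int) + 1) = pvFirst (i+1) (cs.length - i)
        (fun j => decide (cs.getD (j - 1) ' ' = 'L') && decide (pvSH cs j = t)) ((cs.length : Int) + 1)) ∧
    (∀ t : Int, st.2.2.1.getD t ((cs.length : Int) + 1) = pvFirst (i+1) (cs.length - i)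
        (fun j => decide (cs.getD (j - 1) ' ' = 'D') && decide (pvSV cs j = t)) ((cs.length : Int) + 1)) ∧
    (∀ t : Int, st.2.2.2.1.getD t ((cs.length : Int) + 1) = pvFirst (i+1) (cs.length - i)
        (fun j => decide (cs.getD (j - 1) ' ' = 'U') && decide (pvSV cs j = t)) ((cs.length : Int) + 1)) ∧
    st.2.2.2.2.1 = pvChFirst cs i 'R' ∧ st.2.2.2.2.2.1 = pvChFirst cs i 'L' ∧
    st.2.2.2.2.2.2.1 = pvChFirst cs i 'D' ∧ st.2.2.2.2.2.2.2 = pvChFirst cs i 'U' := by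
  subst hst
  by_cases hR : cs.getD i ' ' = 'R'
  · rw [if_pos hR]
    exact ⟨pvMapInvInsert cs 'R' (pvSH cs) i hilt mR hR hmR,
      pvMapInvSkip cs 'L' (pvSH cs) i hilt mL (by rw [hR]; simp) hmL,
      pvMapInvSkip cs 'D' (pvSV cs) i hilt mD (by rw [hR]; simp) hmD,
      pvMapInvSkip cs 'U' (pvSV cs) i hilt mU (by rw [hR]; simp) hmU,
      pvPtrSet cs 'R' i hilt hR,
      pvPtrSkip cs 'L' i hilt (by rw [hR]; simp) fL hfL,
      pvPtrSkip cs 'D' i hilt (by rw [hR]; simp) fD hfD,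
      pvPtrSkip cs 'U' i hilt (by rw [hR]; simp) fU hfU⟩
  · rw [if_neg hR]
    by_cases hL : cs.getD i ' ' = 'L'
    · rw [if_pos hL]
      exact ⟨pvMapInvSkip cs 'R' (pvSH cs) i hilt mR (by rw [hL]; simp) hmR,
        pvMapInvInsert cs 'L' (pvSH cs) i hilt mL hL hmL,
        pvMapInvSkip cs 'D' (pvSV cs) i hilt mD (by rw [hL]; simp) hmD,
        pvMapInvSkip cs 'U' (pvSV cs) i hilt mU (by rw [hL]; simp) hmU,
        pvPtrSkip cs 'R' i hilt (by rw [hL]; simp) fR hfR,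
        pvPtrSet cs 'L' i hilt hL,
        pvPtrSkip cs 'D' i hilt (by rw [hL]; simp) fD hfD,
        pvPtrSkip cs 'U' i hilt (by rw [hL]; simp) fU hfU⟩
    · rw [if_neg hL]
      by_cases hD : cs.getD i ' ' = 'D'
      · rw [if_pos hD]
        exact ⟨pvMapInvSkip cs 'R' (pvSH cs) i hilt mR (by rw [hD]; simp) hmR,
          pvMapInvSkip cs 'L' (pvSH cs) i hilt mL (by rw [hD]; simp) hmL,
          pvMapInvInsert cs 'D' (pvSV cs) i hilt mD hD hmD,
          pvMapInvSkip cs 'U' (pvSV cs) i hilt mU (by rw [hD]; simp) hmU,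
          pvPtrSkip cs 'R' i hilt (by rw [hD]; simp) fR hfR,
          pvPtrSkip cs 'L' i hilt (by rw [hD]; simp) fL hfL,
          pvPtrSet cs 'D' i hilt hD,
          pvPtrSkip cs 'U' i hilt (by rw [hD]; simp) fU hfU⟩
      · rw [if_neg hD]
        by_cases hU : cs.getD i ' ' = 'U'
        · rw [if_pos hU]
          exact ⟨pvMapInvSkip cs 'R' (pvSH cs) i hilt mR (by rw [hU]; simp) hmR,
            pvMapInvSkip cs 'L' (pvSH cs) i hilt mL (by rw [hU]; simp) hmL,
            pvMapInvSkip cs 'D' (pvSV cs) i hilt mD (by rw [hU]; simp) hmD,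
            pvMapInvInsert cs 'U' (pvSV cs) i hilt mU hU hmU,
            pvPtrSkip cs 'R' i hilt (by rw [hU]; simp) fR hfR,
            pvPtrSkip cs 'L' i hilt (by rw [hU]; simp) fL hfL,
            pvPtrSkip cs 'D' i hilt (by rw [hU]; simp) fD hfD,
            pvPtrSet cs 'U' i hilt hU⟩
        · rw [if_neg hU]
          exact ⟨pvMapInvSkip cs 'R' (pvSH cs) i hilt mR hR hmR,
            pvMapInvSkip cs 'L' (pvSH cs) i hilt mL hL hmL,
            pvMapInvSkip cs 'D' (pvSV cs) i hilt mD hD hmD,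
            pvMapInvSkip cs 'U' (pvSV cs) i hilt mU hU hmU,
            pvPtrSkip cs 'R' i hilt hR fR hfR,
            pvPtrSkip cs 'L' i hilt hL fL hfL,
            pvPtrSkip cs 'D' i hilt hD fD hfD,
            pvPtrSkip cs 'U' i hilt hU fU hfU⟩

-- B's countdown loop with valid hashmap/pointer invariants produces the same per-start values
theorem pvLoopB_eq (nn v0 h0 : Int) (cs : List Char) (k : Nat) (hkm : k ≤ cs.length)
    (mR mL mD mU : PySem.Dict Int Int) (fR fL fD fU : Nat) (res : List Int)
    (hmR : ∀ t : Int, mR.getD t ((cs.length : Int) + 1) = pvFirst (k + 1) (cs.length - k)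
        (fun j => decide (cs.getD (j - 1) ' ' = 'R') && decide (pvSH cs j = t)) ((cs.length : Int) + 1))
    (hmL : ∀ t : Int, mL.getD t ((cs.length : Int) + 1) = pvFirst (k + 1) (cs.length - k)
        (fun j => decide (cs.getD (j - 1) ' ' = 'L') && decide (pvSH cs j = t)) ((cs.length : Int) + 1))
    (hmD : ∀ t : Int, mD.getD t ((cs.length : Int) + 1) = pvFirst (k + 1) (cs.length - k)
        (fun j => decide (cs.getD (j - 1) ' ' = 'D') && decide (pvSV cs j = t)) ((cs.length : Int) + 1))
    (hmU : ∀ t : Int, mU.getD t ((cs.length : Int) + 1) = pvFirst (k + 1) (cs.length - k)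
        (fun j => decide (cs.getD (j - 1) ' ' = 'U') && decide (pvSV cs j = t)) ((cs.length : Int) + 1))
    (hfR : fR = pvChFirst cs k 'R') (hfL : fL = pvChFirst cs k 'L')
    (hfD : fD = pvChFirst cs k 'D') (hfU : fU = pvChFirst cs k 'U') :
    pvLoopB nn v0 h0 cs ((List.range (cs.length + 1)).map (pvSH cs))
        ((List.range (cs.length + 1)).map (pvSV cs)) ((List.range (cs.length + 1)).map (pvSC cs))
        cs.length k mR mL mD mU fR fL fD fU res =
      (List.range' 0 k).map (fun t => (pvG nn v0 h0 cs t t).2) ++ res := by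
  induction k generalizing mR mL mD mU fR fL fD fU res with
  | zero => simp [pvLoopB]
  | succ i ih =>
    have hilt : i < cs.length := by omega
    have gHs : ((List.range (cs.length + 1)).map (pvSH cs))[i+1]! = pvSH cs (i+1) :=
      pvMapRangeGet _ _ _ (by omega)
    have gVs : ((List.range (cs.length + 1)).map (pvSV cs))[i+1]! = pvSV cs (i+1) :=
      pvMapRangeGet _ _ _ (by omega)
    have gHi : ((List.range (cs.length + 1)).map (pvSH cs))[i]! = pvSH cs i :=
      pvMapRangeGet _ _ _ (by omega)
    have gVi : ((List.range (cs.length + 1)).map (pvSV cs))[i]! = pvSV cs i :=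
      pvMapRangeGet _ _ _ (by omega)
    have gCi : ((List.range (cs.length + 1)).map (pvSC cs))[i]! = pvSC cs i :=
      pvMapRangeGet _ _ _ (by omega)
    have gCm : ((List.range (cs.length + 1)).map (pvSC cs))[cs.length]! = pvSC cs cs.length :=
      pvMapRangeGet _ _ _ (by omega)
    simp only [pvLoopB, gHs, gVs, gHi, gVi, gCi, gCm]
    obtain ⟨jmR, jmL, jmD, jmU, jfR, jfL, jfD, jfU⟩ :=
      pvStInv cs i hilt mR mL mD mU fR fL fD fU hmR hmL hmD hmU hfR hfL hfD hfU _ rfl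
    rw [jfR, jfL, jfD, jfU, jmR, jmL, jmD, jmU]
    have hgeR := pvChFirst_ge cs i 'R' (by omega)
    have hgeL := pvChFirst_ge cs i 'L' (by omega)
    have hgeD := pvChFirst_ge cs i 'D' (by omega)
    have hgeU := pvChFirst_ge cs i 'U' (by omega)
    have gFR : ((List.range (cs.length + 1)).map (pvSH cs))[pvChFirst cs i 'R']! =
        pvSH cs (pvChFirst cs i 'R') := pvMapRangeGet _ _ _ (by omega)
    have gFL : ((List.range (cs.length + 1)).map (pvSH cs))[pvChFirst cs i 'L']! =
        pvSH cs (pvChFirst cs i 'L') := pvMapRangeGet _ _ _ (by omega)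
    have gFD : ((List.range (cs.length + 1)).map (pvSV cs))[pvChFirst cs i 'D']! =
        pvSV cs (pvChFirst cs i 'D') := pvMapRangeGet _ _ _ (by omega)
    have gFU : ((List.range (cs.length + 1)).map (pvSV cs))[pvChFirst cs i 'U']! =
        pvSV cs (pvChFirst cs i 'U') := pvMapRangeGet _ _ _ (by omega)
    rw [gFR, gFL, gFD, gFU]
    -- reshape the two candidates of each direction to the generic forms
    rw [show (if pvChFirst cs i 'L' < cs.length ∧
          pvSH cs (pvChFirst cs i 'L') ≤ pvSH cs i - h0
        then ((pvChFirst cs i 'L' : Int) + 1) else ((cs.length : Int) + 1)) =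
        (if pvChFirst cs i 'L' < cs.length ∧
          h0 - pvSH cs i ≤ -pvSH cs (pvChFirst cs i 'L')
        then ((pvChFirst cs i 'L' : Int) + 1) else ((cs.length : Int) + 1)) from
      if_congr (and_congr_right fun _ => by omega) rfl rfl]
    rw [show (if pvChFirst cs i 'U' < cs.length ∧
          pvSV cs (pvChFirst cs i 'U') ≤ pvSV cs i - v0
        then ((pvChFirst cs i 'U' : Int) + 1) else ((cs.length : Int) + 1)) =
        (if pvChFirst cs i 'U' < cs.length ∧
          v0 - pvSV cs i ≤ -pvSV cs (pvChFirst cs i 'U')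
        then ((pvChFirst cs i 'U' : Int) + 1) else ((cs.length : Int) + 1)) from
      if_congr (and_congr_right fun _ => by omega) rfl rfl]
    rw [pvFirst_congr (i+1) (cs.length - i)
        (fun j => decide (cs.getD (j - 1) ' ' = 'R') && decide (pvSH cs j = pvSH cs i + (nn - h0)))
        (pvExact cs 'R' (pvSH cs) (pvSH cs i + (nn - 1 - h0))) ((cs.length : Int) + 1)
        (fun j => by
          simp only [pvExact]
          rw [decide_eq_decide.mpr (show (pvSH cs j = pvSH cs i + (nn - h0)) ↔
            (pvSH cs j = pvSH cs i + (nn - 1 - h0) + 1) by omega)]),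
      pvFirst_congr (i+1) (cs.length - i)
        (fun j => decide (cs.getD (j - 1) ' ' = 'L') && decide (pvSH cs j = pvSH cs i - (h0 + 1)))
        (pvExact cs 'L' (fun t => -pvSH cs t) (h0 - pvSH cs i)) ((cs.length : Int) + 1)
        (fun j => by
          simp only [pvExact]
          rw [decide_eq_decide.mpr (show (pvSH cs j = pvSH cs i - (h0 + 1)) ↔
            (-pvSH cs j = h0 - pvSH cs i + 1) by omega)]),
      pvFirst_congr (i+1) (cs.length - i)
        (fun j => decide (cs.getD (j - 1) ' ' = 'D') && decide (pvSV cs j = pvSV cs i + (nn - v0)))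
        (pvExact cs 'D' (pvSV cs) (pvSV cs i + (nn - 1 - v0))) ((cs.length : Int) + 1)
        (fun j => by
          simp only [pvExact]
          rw [decide_eq_decide.mpr (show (pvSV cs j = pvSV cs i + (nn - v0)) ↔
            (pvSV cs j = pvSV cs i + (nn - 1 - v0) + 1) by omega)]),
      pvFirst_congr (i+1) (cs.length - i)
        (fun j => decide (cs.getD (j - 1) ' ' = 'U') && decide (pvSV cs j = pvSV cs i - (v0 + 1)))
        (pvExact cs 'U' (fun t => -pvSV cs t) (v0 - pvSV cs i)) ((cs.length : Int) + 1)
        (fun j => by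
          simp only [pvExact]
          rw [decide_eq_decide.mpr (show (pvSV cs j = pvSV cs i - (v0 + 1)) ↔
            (-pvSV cs j = v0 - pvSV cs i + 1) by omega)])]
    rw [← pvDirFirst cs 'R' (pvSH cs) (pvSH cs i + (nn - 1 - h0)) ((cs.length : Int) + 1)
        (by omega) (pvStepPropR cs) i (by omega),
      ← pvDirFirst cs 'L' (fun t => -pvSH cs t) (h0 - pvSH cs i) ((cs.length : Int) + 1)
        (by omega) (pvStepPropL cs) i (by omega),
      ← pvDirFirst cs 'D' (pvSV cs) (pvSV cs i + (nn - 1 - v0)) ((cs.length : Int) + 1)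
        (by omega) (pvStepPropD cs) i (by omega),
      ← pvDirFirst cs 'U' (fun t => -pvSV cs t) (v0 - pvSV cs i) ((cs.length : Int) + 1)
        (by omega) (pvStepPropU cs) i (by omega)]
    rw [← pvFirst_or (i+1) (cs.length - i) _ _ ((cs.length : Int) + 1) (by omega),
      ← pvFirst_or (i+1) (cs.length - i) _ _ ((cs.length : Int) + 1) (by omega),
      ← pvFirst_or (i+1) (cs.length - i) _ _ ((cs.length : Int) + 1) (by omega)]
    rw [pvFirst_congr (i+1) (cs.length - i)
        (fun j => (pvHitD cs 'R' (pvSH cs) (pvSH cs i + (nn - 1 - h0)) j ||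
            pvHitD cs 'L' (fun t => -pvSH cs t) (h0 - pvSH cs i) j) ||
          (pvHitD cs 'D' (pvSV cs) (pvSV cs i + (nn - 1 - v0)) j ||
            pvHitD cs 'U' (fun t => -pvSV cs t) (v0 - pvSV cs i) j))
        (fun j => pvHit nn v0 h0 cs i j) ((cs.length : Int) + 1) (fun j => rfl)]
    rw [ih (by omega) _ _ _ _ _ _ _ _ _ jmR jmL jmD jmU rfl rfl rfl rfl]
    have hGi := pvG_first nn v0 h0 cs i i le_rfl (by omega)
    rw [List.range'_concat]
    simp only [List.map_append, List.map_cons, List.map_nil, List.append_assoc,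
      List.cons_append, List.nil_append, Nat.zero_add, one_mul]
    congr 1
    congr 1
    cases hf : (List.range' (i+1) (cs.length - i)).find? (fun j => pvHit nn v0 h0 cs i j) with
    | some j =>
      have hjmem := List.mem_of_find?_eq_some hf
      rw [List.mem_range'_1] at hjmem
      have hj1 : 1 ≤ j := by omega
      have hjm : j ≤ cs.length := by omega
      have gCj : ((List.range (cs.length + 1)).map (pvSC cs))[j - 1]! = pvSC cs (j - 1) :=
        pvMapRangeGet _ _ _ (by omega)
      rw [hf] at hGi
      rw [pvFirst_eq_some _ _ _ _ _ hf]
      rw [if_pos (by exact_mod_cast hjm), show ((j : Int) - 1).toNat = j - 1 by omega, gCj]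
      rw [hGi]
    | none =>
      rw [hf] at hGi
      rw [pvFirst_eq_none _ _ _ _ hf]
      rw [if_neg (by omega), hGi]

-- ===== VERDICT (by name: the statement is the Claim_ definition above) =====
theorem executeInstructionsn_spec : Claim_equal_executeInstructionsn := by
  intro n startPos s _ hpre
  unfold Spec_executeInstructionsn
  unfold Pre_executeInstructionsn at hpre
  cases startPos with
  | nil => simp at hpre
  | cons v0 t =>
    cases t with
    | nil => simp at hpre
    | cons h0 rest =>
      have hg0 : (v0 :: h0 :: rest)[0]! = v0 := rfl
      have hg1 : (v0 :: h0 :: rest)[1]! = h0 := rfl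
      show pvOuterA n v0 h0 s.toList 0 [] = executeInstructionsn_alt n (v0 :: h0 :: rest) s
      have hA := pvOuter_eq n v0 h0 s.toList 0 [] rfl (Nat.zero_le _)
      rw [List.drop_zero] at hA
      have hminv : ∀ (S : Nat → Int) (ch : Char) (t : Int),
          (PySem.Dict.empty : PySem.Dict Int Int).getD t ((s.toList.length : Int) + 1) =
            pvFirst (s.toList.length + 1) (s.toList.length - s.toList.length)
              (fun j => decide (s.toList.getD (j - 1) ' ' = ch) && decide (S j = t))
              ((s.toList.length : Int) + 1) := by
        intro S ch t
        rw [PySem.Dict.getD_empty, pvFirst_eq_none _ _ _ _ (by simp)]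
      have hpinv : ∀ ch : Char, s.toList.length = pvChFirst s.toList s.toList.length ch := by
        intro ch
        unfold pvChFirst
        simp
      have hB := pvLoopB_eq n v0 h0 s.toList s.toList.length le_rfl
        PySem.Dict.empty PySem.Dict.empty PySem.Dict.empty PySem.Dict.empty
        s.toList.length s.toList.length s.toList.length s.toList.length []
        (hminv (pvSH s.toList) 'R') (hminv (pvSH s.toList) 'L')
        (hminv (pvSV s.toList) 'D') (hminv (pvSV s.toList) 'U')
        (hpinv 'R') (hpinv 'L') (hpinv 'D') (hpinv 'U')
      show _ = pvLoopB n ((v0 :: h0 :: rest)[0]!) ((v0 :: h0 :: rest)[1]!) s.toList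
        (pvPrefixes s.toList).1 (pvPrefixes s.toList).2.1 (pvPrefixes s.toList).2.2
        s.toList.length s.toList.length
        PySem.Dict.empty PySem.Dict.empty PySem.Dict.empty PySem.Dict.empty
        s.toList.length s.toList.length s.toList.length s.toList.length []
      rw [hg0, hg1]
      unfold pvPrefixes
      rw [pvPrefixes_fold]
      rw [hA, hB]
      simp
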